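-- pv_equiv track=rewrite | github.com/muqiao215/feishu-auth-kit | src/feishu_auth_kit/scopes.py | batch_scopes
-- ===== SOURCE A (Python) =====
-- from collections.abc import Iterable
--
-- def _dedupe_preserve_order(scopes: Iterable[str]) -> list[str]:
--     seen: set[str] = set()
--     items: list[str] = []
--     for scope in scopes:
--         normalized = scope.strip()
--         if normalized and normalized not in seen:
--             seen.add(normalized)
--             items.append(normalized)
--     return items
--
-- def batch_scopes(scopes: Iterable[str], batch_size: int = 100) -> list[list[str]]:
--     if batch_size <= 0:
--         raise ValueError("batch_size must be positive")
--     unique_scopes = _dedupe_preserve_order(scopes)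
--     return [
--         unique_scopes[index : index + batch_size]
--         for index in range(0, len(unique_scopes), batch_size)
--     ]
-- ===== SOURCE B (Python) =====
-- from collections.abc import Iterable
--
-- def batch_scopes(scopes: Iterable[str], batch_size: int = 100) -> list[list[str]]:
--     if batch_size <= 0:
--         raise ValueError("batch_size must be positive")
--     seen: set[str] = set()
--     result: list[list[str]] = []
--     current: list[str] = []
--     for scope in scopes:
--         s = scope.strip()
--         if s and s not in seen:
--             seen.add(s)
--             current.append(s)
--             if len(current) == batch_size:
--                 result.append(current)
--                 current = []
--     if current:
--         result.append(current)
--     return result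
-- ===== Notes on version B (the rewrite author's own statement) =====
-- stated objective: alternative
-- what changed: Instead of building the full deduplicated list and then slicing it by index ranges, B fuses dedupe and chunking into a single pass that fills a current batch and flushes it whenever it reaches batch_size.
import Mathlib
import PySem

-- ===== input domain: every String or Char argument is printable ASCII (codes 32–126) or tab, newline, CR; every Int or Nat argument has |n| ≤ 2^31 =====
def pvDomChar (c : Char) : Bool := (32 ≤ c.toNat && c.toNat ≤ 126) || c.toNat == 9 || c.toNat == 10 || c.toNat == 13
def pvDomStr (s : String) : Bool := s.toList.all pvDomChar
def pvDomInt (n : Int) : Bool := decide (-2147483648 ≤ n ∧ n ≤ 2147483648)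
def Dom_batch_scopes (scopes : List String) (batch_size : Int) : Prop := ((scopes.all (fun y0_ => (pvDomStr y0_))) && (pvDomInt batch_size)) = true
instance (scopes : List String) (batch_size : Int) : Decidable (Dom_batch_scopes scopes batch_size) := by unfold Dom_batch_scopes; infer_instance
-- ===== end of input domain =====

-- B fuses A's two phases (dedupe list, then slice by index ranges) into one pass that
-- flushes a current batch whenever it reaches batch_size; equivalence proved for batch_size > 0.


-- ===== PORT A =====
-- _dedupe_preserve_order: loop over scopes keeping (seen, items)
def dedupe_preserve_order (scopes : List String) : List String :=
  (scopes.foldl (fun (st : PySem.Set String × List String) scope =>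
      let normalized := PySem.Str.strip scope
      if normalized ≠ "" ∧ ¬ PySem.Set.contains st.1 normalized then
        (PySem.Set.add st.1 normalized, st.2 ++ [normalized])
      else st)
    (PySem.Set.empty, [])).2

def batch_scopes (scopes : List String) (batch_size : Int) : List (List String) :=
  if batch_size ≤ 0 then []  -- Python raises ValueError here; excluded by Pre_
  else
    let unique_scopes := dedupe_preserve_order scopes
    (PySem.List.pyRange 0 unique_scopes.length batch_size).map
      (fun index => PySem.List.slice unique_scopes (some index) (some (index + batch_size)))

-- ===== PORT B =====
def batch_scopes_alt (scopes : List String) (batch_size : Int) : List (List String) :=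
  if batch_size ≤ 0 then []  -- Python raises ValueError here; excluded by Pre_
  else
    let st := scopes.foldl (fun (st : PySem.Set String × List (List String) × List String) scope =>
        let s := PySem.Str.strip scope
        if s ≠ "" ∧ ¬ PySem.Set.contains st.1 s then
          let cur := st.2.2 ++ [s]
          if (cur.length : Int) = batch_size then (PySem.Set.add st.1 s, st.2.1 ++ [cur], [])
          else (PySem.Set.add st.1 s, st.2.1, cur)
        else st)
      (PySem.Set.empty, [], [])
    if st.2.2 ≠ [] then st.2.1 ++ [st.2.2] else st.2.1

-- ===== PRECONDITION & SPEC =====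
-- Pre_ excludes batch_size ≤ 0, where A raises ValueError (B raises it too).
def Pre_batch_scopes (scopes : List String) (batch_size : Int) : Prop := 0 < batch_size
instance (scopes : List String) (batch_size : Int) : Decidable (Pre_batch_scopes scopes batch_size) := by unfold Pre_batch_scopes; infer_instance
def pvWitness_batch_scopes : List String × Int := ([" a ", "b", "a", "", "b"], 2)

def Spec_batch_scopes (scopes : List String) (batch_size : Int) (out : List (List String)) : Prop := out = batch_scopes_alt scopes batch_size
instance (scopes : List String) (batch_size : Int) (out : List (List String)) : Decidable (Spec_batch_scopes scopes batch_size out) := by unfold Spec_batch_scopes; infer_instance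

-- ===== CLAIM (what is proved, stated in full; the proofs are below) =====
def Claim_equal_batch_scopes : Prop := ∀ (scopes : List String) (batch_size : Int), Dom_batch_scopes scopes batch_size → Pre_batch_scopes scopes batch_size → Spec_batch_scopes scopes batch_size (batch_scopes scopes batch_size)

-- ===== LEMMAS AND PROOFS =====

-- reference chunking function: split u into consecutive blocks of size b (last may be shorter)
def chunks (b : Nat) (hb : 0 < b) : List String → List (List String)
  | [] => []
  | x :: xs => ((x :: xs).take b) :: chunks b hb ((x :: xs).drop b)
termination_by u => u.length
decreasing_by simp; omega

theorem chunks_nil (b : Nat) (hb : 0 < b) : chunks b hb [] = [] := by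
  rw [chunks]

theorem chunks_cons (b : Nat) (hb : 0 < b) (x : String) (xs : List String) :
    chunks b hb (x :: xs) = ((x :: xs).take b) :: chunks b hb ((x :: xs).drop b) := by
  rw [chunks]

-- A's dedupe step / fold
def dstep (st : PySem.Set String × List String) (scope : String) : PySem.Set String × List String :=
  let normalized := PySem.Str.strip scope
  if normalized ≠ "" ∧ ¬ PySem.Set.contains st.1 normalized then
    (PySem.Set.add st.1 normalized, st.2 ++ [normalized])
  else st

-- B's chunking step on (result, current)
def cstep (b : Nat) (rc : List (List String) × List String) (s : String) : List (List String) × List String :=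
  let cur := rc.2 ++ [s]
  if cur.length = b then (rc.1 ++ [cur], []) else (rc.1, cur)

def finish (rc : List (List String) × List String) : List (List String) :=
  if rc.2 ≠ [] then rc.1 ++ [rc.2] else rc.1

theorem dfold_items (scopes : List String) : ∀ (seen : PySem.Set String) (items : List String),
    scopes.foldl dstep (seen, items)
      = ((scopes.foldl dstep (seen, [])).1, items ++ (scopes.foldl dstep (seen, [])).2) := by
  induction scopes with
  | nil => intro seen items; simp
  | cons x rest ih =>
    intro seen items
    simp only [List.foldl_cons, dstep]
    by_cases h : PySem.Str.strip x ≠ "" ∧ ¬ PySem.Set.contains seen (PySem.Str.strip x)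
    · simp only [if_pos h, List.nil_append]
      rw [ih (PySem.Set.add seen (PySem.Str.strip x)) (items ++ [PySem.Str.strip x]),
          ih (PySem.Set.add seen (PySem.Str.strip x)) [PySem.Str.strip x]]
      simp
    · simp only [if_neg h]
      exact ih seen items

theorem fuse (b : Nat) (scopes : List String) :
    ∀ (seen : PySem.Set String) (rc : List (List String) × List String),
    scopes.foldl (fun (st : PySem.Set String × List (List String) × List String) scope =>
        let s := PySem.Str.strip scope
        if s ≠ "" ∧ ¬ PySem.Set.contains st.1 s then
          let cur := st.2.2 ++ [s]
          if (cur.length : Int) = (b : Int) then (PySem.Set.add st.1 s, st.2.1 ++ [cur], [])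
          else (PySem.Set.add st.1 s, st.2.1, cur)
        else st)
      (seen, rc)
      = ((scopes.foldl dstep (seen, [])).1,
         ((scopes.foldl dstep (seen, [])).2).foldl (cstep b) rc) := by
  induction scopes with
  | nil => intro seen rc; simp
  | cons x rest ih =>
    intro seen rc
    simp only [List.foldl_cons, dstep]
    by_cases h : PySem.Str.strip x ≠ "" ∧ ¬ PySem.Set.contains seen (PySem.Str.strip x)
    · simp only [if_pos h, List.nil_append]
      rw [dfold_items rest (PySem.Set.add seen (PySem.Str.strip x)) [PySem.Str.strip x]]
      by_cases hl : (rc.2 ++ [PySem.Str.strip x]).length = b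
      · rw [if_pos (show ((rc.2 ++ [PySem.Str.strip x]).length : Int) = (b : Int) by
          exact_mod_cast hl)]
        rw [ih (PySem.Set.add seen (PySem.Str.strip x)) (rc.1 ++ [rc.2 ++ [PySem.Str.strip x]], [])]
        have hl' : rc.2.length + 1 = b := by simpa using hl
        simp [cstep, hl']
      · rw [if_neg (show ¬ ((rc.2 ++ [PySem.Str.strip x]).length : Int) = (b : Int) by
          exact_mod_cast hl)]
        rw [ih (PySem.Set.add seen (PySem.Str.strip x)) (rc.1, rc.2 ++ [PySem.Str.strip x])]
        have hl' : ¬ (rc.2.length + 1 = b) := by simpa using hl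
        simp [cstep, hl']
    · simp only [if_neg h]
      exact ih seen rc

theorem cfold_chunks (b : Nat) (hb : 0 < b) (u : List String) :
    ∀ (res : List (List String)) (cur : List String), cur.length < b →
    finish (u.foldl (cstep b) (res, cur)) = res ++ chunks b hb (cur ++ u) := by
  induction u with
  | nil =>
    intro res cur hcur
    simp only [List.foldl_nil, List.append_nil]
    rcases cur with _ | ⟨c, cs⟩
    · simp [finish, chunks_nil]
    · rw [chunks_cons]
      simp [finish, List.take_of_length_le (le_of_lt hcur), chunks_nil,
            List.drop_eq_nil_of_le (le_of_lt hcur)]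
  | cons x rest ih =>
    intro res cur hcur
    simp only [List.foldl_cons, cstep]
    by_cases hl : (cur ++ [x]).length = b
    · simp only [if_pos hl]
      rw [ih (res ++ [cur ++ [x]]) [] hb]
      have htk : (cur ++ x :: rest).take b = cur ++ [x] := by
        have : cur ++ x :: rest = (cur ++ [x]) ++ rest := by simp
        rw [this, List.take_append_of_le_length (le_of_eq hl.symm),
            List.take_of_length_le (le_of_eq hl)]
      have hdr : (cur ++ x :: rest).drop b = rest := by
        have : cur ++ x :: rest = (cur ++ [x]) ++ rest := by simp
        rw [this, ← hl, List.drop_left]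
      have hne : cur ++ x :: rest ≠ [] := by simp
      rcases hcons : cur ++ x :: rest with _ | ⟨y, ys⟩
      · exact absurd hcons hne
      · rw [chunks_cons, ← hcons, htk, hdr]; simp
    · simp only [if_neg hl]
      have hl2 : ¬ cur.length + 1 = b := by simpa using hl
      have : (cur ++ [x]).length < b := by simp; omega
      rw [ih res (cur ++ [x]) this]
      simp

-- pyRange helper lemmas for positive step
theorem pyRange_pos_nil (a n s : Int) (hs : 0 < s) (h : n ≤ a) :
    PySem.List.pyRange a n s = [] := by
  rw [PySem.List.pyRange_of_pos a n hs, if_neg (not_lt.mpr h)]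
  simp

theorem pyRange_pos_cons (a n s : Int) (hs : 0 < s) (h : a < n) :
    PySem.List.pyRange a n s = a :: PySem.List.pyRange (a + s) n s := by
  rw [PySem.List.pyRange_of_pos a n hs, PySem.List.pyRange_of_pos (a + s) n hs]
  have hd : n - a + s - 1 = (n - a - 1) + 1 * s := by ring
  have hnum : (n - a + s - 1) / s = (n - a - 1) / s + 1 := by
    rw [hd, Int.add_mul_ediv_right _ _ (ne_of_gt hs)]
  by_cases h2 : a + s < n
  · have hn2 : n - (a + s) + s - 1 = n - a - 1 := by ring
    rw [if_pos h, if_pos h2, hnum, hn2]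
    have hq : 0 ≤ (n - a - 1) / s := Int.ediv_nonneg (by omega) (le_of_lt hs)
    have : ((n - a - 1) / s + 1).toNat = ((n - a - 1) / s).toNat + 1 := by omega
    rw [this, List.range_succ_eq_map]
    simp only [List.map_cons, List.map_map]
    congr 1
    · simp
    · apply List.map_congr_left
      intro k _
      simp [Function.comp, Nat.succ_eq_add_one]
      ring
  · -- a < n ≤ a + s : exactly one element
    have hq : (n - a - 1) / s = 0 := by
      apply Int.ediv_eq_zero_of_lt <;> omega
    rw [if_pos h, if_neg h2, hnum, hq]
    simp
theorem pyRange_shift (a n c s : Int) (hs : 0 < s) :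
    PySem.List.pyRange (a + c) (n + c) s = (PySem.List.pyRange a n s).map (· + c) := by
  rw [PySem.List.pyRange_of_pos _ _ hs, PySem.List.pyRange_of_pos a n hs]
  have h1 : n + c - (a + c) + s - 1 = n - a + s - 1 := by ring
  have h2 : a + c < n + c ↔ a < n := by omega
  rw [h1]
  simp only [h2, List.map_map]
  apply List.map_congr_left
  intro k _
  simp; ring

theorem A_chunks (b : Nat) (hb : 0 < b) (u : List String) :
    (PySem.List.pyRange 0 u.length (b : Int)).map
        (fun index => PySem.List.slice u (some index) (some (index + (b : Int))))
      = chunks b hb u := by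
  induction hn : u.length using Nat.strong_induction_on generalizing u with
  | _ n ih =>
    rcases u with _ | ⟨x, xs⟩
    · subst hn; rw [pyRange_pos_nil _ _ _ (by exact_mod_cast hb) (by simp)]
      simp [chunks_nil]
    · rw [← hn]
      have hlen : (0 : Int) < ((x :: xs).length : Int) := by
        exact_mod_cast Nat.succ_pos xs.length
      rw [pyRange_pos_cons 0 _ _ (by exact_mod_cast hb) hlen, chunks_cons]
      simp only [List.map_cons]
      congr 1
      · rw [PySem.List.slice_toNat _ (le_refl 0) (by positivity)]
        simp
      · -- tail: shift the range by b and recurse on the dropped list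
        have hdroplen : (((x :: xs).drop b).length : Int) = (x :: xs).length - b
            ∨ ((x :: xs).drop b) = [] ∧ ((x :: xs).length : Int) ≤ b := by
          by_cases hcmp : b ≤ (x :: xs).length
          · left; rw [List.length_drop]; omega
          · right; constructor
            · exact List.drop_eq_nil_of_le (by omega)
            · exact_mod_cast le_of_lt (lt_of_not_ge hcmp)
        have key : ∀ v : List String, v = (x :: xs).drop b →
            (PySem.List.pyRange (0 + b) ((x :: xs).length) (b : Int)).map
              (fun index => PySem.List.slice (x :: xs) (some index) (some (index + (b : Int))))
              = (PySem.List.pyRange 0 v.length (b : Int)).map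
                  (fun index => PySem.List.slice v (some index) (some (index + (b : Int)))) := by
          intro v hv
          rcases hdroplen with hgood | ⟨hnil, hle⟩
          · have hshift : PySem.List.pyRange (0 + b) ((x :: xs).length) (b : Int)
                = (PySem.List.pyRange 0 (v.length) (b : Int)).map (· + (b : Int)) := by
              have : ((x : String) :: xs).length = (v.length : Int) + b := by rw [hv, hgood]; ring
              rw [this, ← pyRange_shift 0 v.length (b : Int) _ (by exact_mod_cast hb)]
            rw [hshift, List.map_map]
            apply List.map_congr_left
            intro i hi
            have hi0 : 0 ≤ i := by
              rw [PySem.List.pyRange_of_pos _ _ (by exact_mod_cast hb : (0:Int) < b)] at hi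
              simp at hi
              rcases hi with ⟨k, _, rfl⟩
              positivity
            simp only [Function.comp_apply]
            rw [PySem.List.slice_toNat _ (by omega) (by omega),
                PySem.List.slice_toNat _ hi0 (by omega), hv, List.drop_drop]
            congr 1
            · omega
            · congr 1; omega
          · rw [hv, hnil]
            rw [pyRange_pos_nil _ _ _ (by exact_mod_cast hb) (by omega),
                pyRange_pos_nil _ _ _ (by exact_mod_cast hb) (by simp)]
            simp
        rw [key ((x :: xs).drop b) rfl]
        apply ih ((x :: xs).drop b).length _ _ rfl
        rw [← hn]; simp; omega

-- ===== VERDICT (by name: the statement is the Claim_ definition above) =====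
theorem batch_scopes_spec : Claim_equal_batch_scopes := by
  intro scopes batch_size _ hpre
  have hpre' : (0 : Int) < batch_size := hpre
  obtain ⟨b, rfl⟩ : ∃ b : Nat, batch_size = (b : Int) :=
    ⟨batch_size.toNat, (Int.toNat_of_nonneg (le_of_lt hpre')).symm⟩
  have hb : 0 < b := by exact_mod_cast hpre'
  unfold Spec_batch_scopes batch_scopes batch_scopes_alt
  simp only [if_neg (not_le.mpr hpre')]
  rw [fuse b scopes PySem.Set.empty ([], [])]
  show (PySem.List.pyRange 0 (dedupe_preserve_order scopes).length (b : Int)).map _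
      = finish (List.foldl (cstep b) ([], []) (scopes.foldl dstep (PySem.Set.empty, [])).2)
  rw [cfold_chunks b hb (scopes.foldl dstep (PySem.Set.empty, [])).2 [] [] (by simpa using hb)]
  have hd : dedupe_preserve_order scopes = (scopes.foldl dstep (PySem.Set.empty, [])).2 := by
    unfold dedupe_preserve_order dstep; rfl
  rw [hd]
  simpa using A_chunks b hb (scopes.foldl dstep (PySem.Set.empty, [])).2
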